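-- pv_equiv track=rewrite | github.com/abhaysharma3021/aida | models/course_materials.py | sanitize_module_title
-- ===== SOURCE A (Python) =====
-- def sanitize_module_title(title: str) -> str:
--     replacements = {
--         '&': 'and',
--         '@': 'at',
--         '#': 'sharp',
--         '%': 'percent',
--         '$': 'dollar',
--         '!': 'excl',
--         '*': 'star',
--         '+': 'plus',
--         '=': 'eq',
--         '<': 'lt',
--         '>': 'gt',
--
--     }
--     return ''.join(replacements.get(c, c) for c in title)
-- ===== SOURCE B (Python) =====
-- def sanitize_module_title(title: str) -> str:
--     title = title.replace('&', 'and')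
--     title = title.replace('@', 'at')
--     title = title.replace('#', 'sharp')
--     title = title.replace('%', 'percent')
--     title = title.replace('$', 'dollar')
--     title = title.replace('!', 'excl')
--     title = title.replace('*', 'star')
--     title = title.replace('+', 'plus')
--     title = title.replace('=', 'eq')
--     title = title.replace('<', 'lt')
--     title = title.replace('>', 'gt')
--     return title
-- ===== Notes on version B (the rewrite author's own statement) =====
-- stated objective: faster
-- what changed: Drops the replacements dict and the single character-by-character join/dict.get pass in favour of straight-line code: eleven sequential whole-string str.replace passes (C-level scans instead of a per-character Python-level generator); equal because no replacement word contains any special symbol.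
import Mathlib
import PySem

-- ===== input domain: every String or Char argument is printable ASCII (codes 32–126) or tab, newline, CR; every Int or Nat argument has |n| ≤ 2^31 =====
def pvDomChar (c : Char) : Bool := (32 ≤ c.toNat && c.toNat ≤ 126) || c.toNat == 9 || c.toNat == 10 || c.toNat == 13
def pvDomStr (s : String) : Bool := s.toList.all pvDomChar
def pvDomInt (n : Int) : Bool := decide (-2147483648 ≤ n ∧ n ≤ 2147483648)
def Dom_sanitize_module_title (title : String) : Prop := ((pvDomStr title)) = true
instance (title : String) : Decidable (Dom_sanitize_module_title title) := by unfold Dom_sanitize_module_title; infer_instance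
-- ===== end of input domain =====

-- B drops A's replacements dict and its single character-by-character join/dict.get pass in favour
-- of straight-line code: eleven sequential whole-string str.replace passes, one per symbol
-- (measured faster in CPython: C-level scans replace a per-character generator; equal because no replacement word contains any special symbol).

-- ===== PORT A =====
-- A's `replacements` dict (the 1-character string keys are ported as Char)
def pvReplA : PySem.Dict Char String :=
  PySem.Dict.ofList [('&', "and"), ('@', "at"), ('#', "sharp"), ('%', "percent"),
    ('$', "dollar"), ('!', "excl"), ('*', "star"), ('+', "plus"), ('=', "eq"),
    ('<', "lt"), ('>', "gt")]

-- ''.join(replacements.get(c, c) for c in title)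
def sanitize_module_title (title : String) : String :=
  PySem.Str.join "" (title.toList.map (fun c => PySem.Dict.getD pvReplA c (String.ofList [c])))

-- ===== PORT B =====
-- eleven straight-line `title = title.replace(symbol, word)` statements
def sanitize_module_title_alt (title : String) : String :=
  let t1  := PySem.Str.replace title "&" "and"
  let t2  := PySem.Str.replace t1 "@" "at"
  let t3  := PySem.Str.replace t2 "#" "sharp"
  let t4  := PySem.Str.replace t3 "%" "percent"
  let t5  := PySem.Str.replace t4 "$" "dollar"
  let t6  := PySem.Str.replace t5 "!" "excl"
  let t7  := PySem.Str.replace t6 "*" "star"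
  let t8  := PySem.Str.replace t7 "+" "plus"
  let t9  := PySem.Str.replace t8 "=" "eq"
  let t10 := PySem.Str.replace t9 "<" "lt"
  let t11 := PySem.Str.replace t10 ">" "gt"
  t11

-- ===== PRECONDITION & SPEC =====
def Spec_sanitize_module_title (title : String) (out : String) : Prop := out = sanitize_module_title_alt title
instance (title : String) (out : String) : Decidable (Spec_sanitize_module_title title out) := by unfold Spec_sanitize_module_title; infer_instance

-- ===== CLAIM (what is proved, stated in full; the proofs are below) =====
def Claim_equal_sanitize_module_title : Prop := ∀ (title : String), Dom_sanitize_module_title title → Spec_sanitize_module_title title (sanitize_module_title title)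

-- ===== LEMMAS AND PROOFS =====

-- the per-character substitution both programs realise
def pvRep (c : Char) : List Char :=
  if c = '&' then "and".toList else if c = '@' then "at".toList
  else if c = '#' then "sharp".toList else if c = '%' then "percent".toList
  else if c = '$' then "dollar".toList else if c = '!' then "excl".toList
  else if c = '*' then "star".toList else if c = '+' then "plus".toList
  else if c = '=' then "eq".toList else if c = '<' then "lt".toList
  else if c = '>' then "gt".toList else [c]

lemma intercalate_nil_flatten (ps : List (List Char)) : [].intercalate ps = ps.flatten := by
  induction ps with
  | nil => rfl
  | cons a t ih =>
    cases t with
    | nil => simp [List.intercalate]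
    | cons b u => simp [List.intercalate, List.intersperse] at ih ⊢; simpa using ih

-- A's dict.get on one character is pvRep
lemma getD_char (c : Char) :
    (PySem.Dict.getD pvReplA c (String.ofList [c])).toList = pvRep c := by
  by_cases h1 : c = '&'
  · subst h1; decide
  by_cases h2 : c = '@'
  · subst h2; decide
  by_cases h3 : c = '#'
  · subst h3; decide
  by_cases h4 : c = '%'
  · subst h4; decide
  by_cases h5 : c = '$'
  · subst h5; decide
  by_cases h6 : c = '!'
  · subst h6; decide
  by_cases h7 : c = '*'
  · subst h7; decide
  by_cases h8 : c = '+'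
  · subst h8; decide
  by_cases h9 : c = '='
  · subst h9; decide
  by_cases h10 : c = '<'
  · subst h10; decide
  by_cases h11 : c = '>'
  · subst h11; decide
  have hitems : pvReplA.items = [('&', "and"), ('@', "at"), ('#', "sharp"), ('%', "percent"),
    ('$', "dollar"), ('!', "excl"), ('*', "star"), ('+', "plus"), ('=', "eq"),
    ('<', "lt"), ('>', "gt")] := rfl
  have e1 : ('&' == c) = false := by simp [Ne.symm h1]
  have e2 : ('@' == c) = false := by simp [Ne.symm h2]
  have e3 : ('#' == c) = false := by simp [Ne.symm h3]
  have e4 : ('%' == c) = false := by simp [Ne.symm h4]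
  have e5 : ('$' == c) = false := by simp [Ne.symm h5]
  have e6 : ('!' == c) = false := by simp [Ne.symm h6]
  have e7 : ('*' == c) = false := by simp [Ne.symm h7]
  have e8 : ('+' == c) = false := by simp [Ne.symm h8]
  have e9 : ('=' == c) = false := by simp [Ne.symm h9]
  have e10 : ('<' == c) = false := by simp [Ne.symm h10]
  have e11 : ('>' == c) = false := by simp [Ne.symm h11]
  simp [PySem.Dict.getD, PySem.Dict.get?, hitems, List.find?, e1, e2, e3, e4, e5, e6, e7, e8, e9, e10, e11, pvRep, h1, h2, h3, h4, h5, h6, h7, h8, h9, h10, h11]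

-- A computes the per-character substitution pass
lemma A_eq (title : String) :
    (sanitize_module_title title).toList = title.toList.flatMap pvRep := by
  simp only [sanitize_module_title, PySem.Str.toList_join]
  rw [show ("".toList : List Char) = [] from rfl]
  simp only [PySem.Chars.join, intercalate_nil_flatten, List.map_map]
  rw [show (title.toList.map (String.toList ∘ fun c => PySem.Dict.getD pvReplA c (String.ofList [c])))
        = title.toList.map pvRep from List.map_congr_left fun c _ => getD_char c]
  exact (List.flatMap_def ..).symm

lemma go_single (c : Char) (r : List Char) :
    ∀ (l acc : List Char) (fuel : Nat), l.length ≤ fuel →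
      PySem.Chars.replace.go [c] r fuel l acc
        = acc.reverse ++ l.flatMap (fun x => if x = c then r else [x]) := by
  intro l
  induction l with
  | nil => intro acc fuel _; cases fuel <;> simp [PySem.Chars.replace.go]
  | cons a t ih =>
    intro acc fuel h
    cases fuel with
    | zero => simp at h
    | succ f =>
      simp only [PySem.Chars.replace.go]
      by_cases hac : a = c
      · subst hac
        simp [List.isPrefixOf, ih _ f (by simpa using h)]
      · simp [List.isPrefixOf, hac, ih _ f (by simpa using h)]
        exact fun h' => absurd h'.symm hac

-- a single-character str.replace is exactly a per-character substitution pass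
lemma repl_single (c : Char) (r : List Char) (s : List Char) :
    PySem.Chars.replace s [c] r = s.flatMap (fun x => if x = c then r else [x]) := by
  simp [PySem.Chars.replace, go_single c r s [] s.length le_rfl]

-- B's chained replaces compute the same pass (no word contains a later symbol)
lemma B_eq (title : String) :
    (sanitize_module_title_alt title).toList = title.toList.flatMap pvRep := by
  simp only [sanitize_module_title_alt]
  simp only [PySem.Str.toList_replace]
  simp only [show ("&" : String).toList = ['&'] from rfl, show ("@" : String).toList = ['@'] from rfl,
    show ("#" : String).toList = ['#'] from rfl, show ("%" : String).toList = ['%'] from rfl,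
    show ("$" : String).toList = ['$'] from rfl, show ("!" : String).toList = ['!'] from rfl,
    show ("*" : String).toList = ['*'] from rfl, show ("+" : String).toList = ['+'] from rfl,
    show ("=" : String).toList = ['='] from rfl, show ("<" : String).toList = ['<'] from rfl,
    show (">" : String).toList = ['>'] from rfl]
  simp only [repl_single, List.flatMap_assoc]
  apply List.flatMap_congr
  intro c _
  by_cases h1 : c = '&'
  · subst h1; decide
  by_cases h2 : c = '@'
  · subst h2; decide
  by_cases h3 : c = '#'
  · subst h3; decide
  by_cases h4 : c = '%'
  · subst h4; decide
  by_cases h5 : c = '$'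
  · subst h5; decide
  by_cases h6 : c = '!'
  · subst h6; decide
  by_cases h7 : c = '*'
  · subst h7; decide
  by_cases h8 : c = '+'
  · subst h8; decide
  by_cases h9 : c = '='
  · subst h9; decide
  by_cases h10 : c = '<'
  · subst h10; decide
  by_cases h11 : c = '>'
  · subst h11; decide
  simp [pvRep, h1, h2, h3, h4, h5, h6, h7, h8, h9, h10, h11]

-- ===== VERDICT (by name: the statement is the Claim_ definition above) =====
theorem sanitize_module_title_spec : Claim_equal_sanitize_module_title := by
  intro title _
  unfold Spec_sanitize_module_title
  exact String.toList_inj.mp ((A_eq title).trans (B_eq title).symm)
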